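-- pv_equiv track=rewrite | github.com/Eshaagoyal/Talking-BI | backend/agents/insight_eval.py | _kpi_coverage_from_facts
-- ===== SOURCE A (Python) =====
-- def _kpi_coverage_from_facts(dashboards: dict, kpis: list) -> tuple:
--     """Ground KPI coverage in chart y_axis / x_axis names (InsightEval-style verification)."""
--     if not kpis:
--         return 100, [], []
--     covered = set()
--     for d in dashboards.values():
--         yax = str(d.get("y_axis") or "").lower().replace("_", " ")
--         xax = str(d.get("x_axis") or "").lower().replace("_", " ")
--         for k in kpis:
--             kl = k.lower().replace("_", " ")
--             if kl in yax or kl in xax: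
--                 covered.add(k)
--     cov_list = [k for k in kpis if k in covered]
--     miss_list = [k for k in kpis if k not in covered]
--     pct = int(round(100 * len(cov_list) / len(kpis))) if kpis else 100
--     return pct, cov_list, miss_list
-- ===== SOURCE B (Python) =====
-- def _kpi_coverage_from_facts(dashboards: dict, kpis: list) -> tuple:
--     """Single pass over KPIs against precomputed normalized axis strings."""
--     if not kpis:
--         return 100, [], []
--     axes = [
--         (str(d.get("y_axis") or "").lower().replace("_", " "),
--          str(d.get("x_axis") or "").lower().replace("_", " "))
--         for d in dashboards.values()
--     ]
--     cov_list, miss_list = [], []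
--     for k in kpis:
--         kl = k.lower().replace("_", " ")
--         if any(kl in y or kl in x for (y, x) in axes):
--             cov_list.append(k)
--         else:
--             miss_list.append(k)
--     return int(round(100 * len(cov_list) / len(kpis))), cov_list, miss_list
-- ===== Notes on version B (the rewrite author's own statement) =====
-- stated objective: simpler
-- what changed: Replaces the dashboards-outer/kpis-inner nested loop maintaining a 'covered' set plus two follow-up filter passes by a single pass over kpis against a once-precomputed list of normalized axis pairs, appending directly to cov_list/miss_list.
import Mathlib
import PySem

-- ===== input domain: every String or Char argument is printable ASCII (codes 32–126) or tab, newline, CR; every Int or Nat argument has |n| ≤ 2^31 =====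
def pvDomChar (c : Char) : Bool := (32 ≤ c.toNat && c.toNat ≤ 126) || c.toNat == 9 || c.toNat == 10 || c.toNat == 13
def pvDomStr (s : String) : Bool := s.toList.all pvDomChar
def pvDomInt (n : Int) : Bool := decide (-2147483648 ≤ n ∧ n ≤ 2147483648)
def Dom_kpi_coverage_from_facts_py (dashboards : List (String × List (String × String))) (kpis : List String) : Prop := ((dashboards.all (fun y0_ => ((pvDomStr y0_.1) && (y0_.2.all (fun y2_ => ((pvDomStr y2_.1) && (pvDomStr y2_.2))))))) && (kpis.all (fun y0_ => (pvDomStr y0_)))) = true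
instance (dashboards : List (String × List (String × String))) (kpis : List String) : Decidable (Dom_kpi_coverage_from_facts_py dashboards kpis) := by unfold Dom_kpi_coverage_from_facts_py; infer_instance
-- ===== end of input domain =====

-- B replaces A's dashboards×kpis nested loop maintaining a 'covered' set plus two filter
-- passes by one direct pass over kpis against precomputed normalized axes (objective: simpler).

-- shared helper: s.lower().replace("_", " ")  (both Pythons contain this expression verbatim)
def pvNorm (s : String) : String := PySem.Str.replace (PySem.Str.lower s) "_" " "

-- int(round(100 * c / n)) for 0 < n: round-half-even of the exact rational 100*c/n
-- (exact w.r.t. CPython here: half-integer values of 100*c/n are float-exact and other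
-- values are farther from a half-integer boundary than the float division's error).
def pvRound100 (c n : Int) : Int :=
  let a := 100 * c
  let q := PySem.Int.floordiv a n
  let r := a - q * n
  if 2 * r < n then q
  else if n < 2 * r then q + 1
  else if PySem.Int.mod q 2 = 0 then q else q + 1

-- ===== PORT A =====
def kpi_coverage_from_facts_py (dashboards : List (String × List (String × String))) (kpis : List String) : Int × List String × List String :=
  if kpis.isEmpty then (100, [], [])
  else
    let covered : PySem.Set String := dashboards.foldl (fun cov dv =>
      let yax := pvNorm (((PySem.Dict.mk dv.2).get? "y_axis").getD "")
      let xax := pvNorm (((PySem.Dict.mk dv.2).get? "x_axis").getD "")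
      kpis.foldl (fun cov k =>
        let kl := pvNorm k
        if PySem.Str.isIn kl yax || PySem.Str.isIn kl xax then PySem.Set.add cov k else cov) cov)
      PySem.Set.empty
    let cov_list := kpis.filter (fun k => PySem.Set.contains covered k)
    let miss_list := kpis.filter (fun k => !(PySem.Set.contains covered k))
    (pvRound100 cov_list.length kpis.length, cov_list, miss_list)

-- ===== PORT B =====
def kpi_coverage_from_facts_py_alt (dashboards : List (String × List (String × String))) (kpis : List String) : Int × List String × List String :=
  if kpis.isEmpty then (100, [], [])
  else
    let axes := dashboards.map (fun dv =>
      (pvNorm (((PySem.Dict.mk dv.2).get? "y_axis").getD ""),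
       pvNorm (((PySem.Dict.mk dv.2).get? "x_axis").getD "")))
    let lists := kpis.foldl (fun (acc : List String × List String) k =>
      let kl := pvNorm k
      if axes.any (fun yx => PySem.Str.isIn kl yx.1 || PySem.Str.isIn kl yx.2)
      then (acc.1 ++ [k], acc.2) else (acc.1, acc.2 ++ [k])) ([], [])
    (pvRound100 lists.1.length kpis.length, lists.1, lists.2)

-- ===== PRECONDITION & SPEC =====
def Spec_kpi_coverage_from_facts_py (dashboards : List (String × List (String × String))) (kpis : List String) (out : Int × List String × List String) : Prop := out = kpi_coverage_from_facts_py_alt dashboards kpis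
instance (dashboards : List (String × List (String × String))) (kpis : List String) (out : Int × List String × List String) : Decidable (Spec_kpi_coverage_from_facts_py dashboards kpis out) := by unfold Spec_kpi_coverage_from_facts_py; infer_instance

-- ===== CLAIM (what is proved, stated in full; the proofs are below) =====
def Claim_equal_kpi_coverage_from_facts_py : Prop := ∀ (dashboards : List (String × List (String × String))) (kpis : List String), Dom_kpi_coverage_from_facts_py dashboards kpis → Spec_kpi_coverage_from_facts_py dashboards kpis (kpi_coverage_from_facts_py dashboards kpis)

-- ===== LEMMAS AND PROOFS =====

-- membership in A's inner fold over kpis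
theorem pv_mem_inner (kpis : List String) (p : String → Bool) (acc : PySem.Set String) (x : String) :
    x ∈ kpis.foldl (fun cov k => if p k then PySem.Set.add cov k else cov) acc ↔
      x ∈ acc ∨ (x ∈ kpis ∧ p x = true) := by
  induction kpis generalizing acc with
  | nil => simp
  | cons k ks ih =>
    simp only [List.foldl_cons]
    rw [ih]
    by_cases hp : p k = true
    · rw [if_pos hp]
      simp only [PySem.Set.mem_add, List.mem_cons]
      constructor
      · rintro ((h | rfl) | ⟨h, hx⟩)
        exacts [Or.inl h, Or.inr ⟨Or.inl rfl, hp⟩, Or.inr ⟨Or.inr h, hx⟩]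
      · rintro (h | ⟨rfl | h, hx⟩)
        exacts [Or.inl (Or.inl h), Or.inl (Or.inr rfl), Or.inr ⟨h, hx⟩]
    · rw [if_neg hp]
      simp only [List.mem_cons]
      constructor
      · rintro (h | ⟨h, hx⟩)
        exacts [Or.inl h, Or.inr ⟨Or.inr h, hx⟩]
      · rintro (h | ⟨rfl | h, hx⟩)
        exacts [Or.inl h, absurd hx hp, Or.inr ⟨h, hx⟩]

-- membership in A's outer fold over dashboards
theorem pv_mem_outer (ds : List (String × List (String × String))) (kpis : List String)
    (q : List (String × String) → String → Bool) (acc : PySem.Set String) (x : String) :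
    x ∈ ds.foldl (fun cov dv =>
        kpis.foldl (fun cov k => if q dv.2 k then PySem.Set.add cov k else cov) cov) acc ↔
      x ∈ acc ∨ (x ∈ kpis ∧ ∃ d ∈ ds, q d.2 x = true) := by
  induction ds generalizing acc with
  | nil => simp
  | cons d ds ih =>
    simp only [List.foldl_cons]
    rw [ih, pv_mem_inner kpis (fun k => q d.2 k) acc x]
    constructor
    · rintro ((h | ⟨hk, hq⟩) | ⟨hk, d', hd', hq⟩)
      · exact Or.inl h
      · exact Or.inr ⟨hk, d, List.mem_cons_self, hq⟩
      · exact Or.inr ⟨hk, d', List.mem_cons_of_mem _ hd', hq⟩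
    · rintro (h | ⟨hk, d', hd', hq⟩)
      · exact Or.inl (Or.inl h)
      · rcases List.mem_cons.mp hd' with rfl | hd'
        · exact Or.inl (Or.inr ⟨hk, hq⟩)
        · exact Or.inr ⟨hk, d', hd', hq⟩

-- B's pair-building fold is the two filters
theorem pv_pair_fold (kpis : List String) (p : String → Bool) (acc : List String × List String) :
    kpis.foldl (fun (acc : List String × List String) k =>
        if p k then (acc.1 ++ [k], acc.2) else (acc.1, acc.2 ++ [k])) acc =
      (acc.1 ++ kpis.filter p, acc.2 ++ kpis.filter (fun k => !(p k))) := by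
  induction kpis generalizing acc with
  | nil => simp
  | cons k ks ih =>
    by_cases hp : p k = true
    · simp [hp, ih]
    · simp only [Bool.not_eq_true] at hp
      simp [hp, ih]

-- ===== VERDICT (by name: the statement is the Claim_ definition above) =====
theorem kpi_coverage_from_facts_py_spec : Claim_equal_kpi_coverage_from_facts_py := by
  intro dashboards kpis _
  show kpi_coverage_from_facts_py dashboards kpis = kpi_coverage_from_facts_py_alt dashboards kpis
  unfold kpi_coverage_from_facts_py kpi_coverage_from_facts_py_alt
  by_cases h : kpis.isEmpty
  · simp only [if_pos h]
  · simp only [if_neg h]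
    have hcov : ∀ k ∈ kpis,
        (PySem.Set.contains (dashboards.foldl (fun cov dv =>
          kpis.foldl (fun cov k =>
            if PySem.Str.isIn (pvNorm k) (pvNorm (((PySem.Dict.mk dv.2).get? "y_axis").getD "")) ||
               PySem.Str.isIn (pvNorm k) (pvNorm (((PySem.Dict.mk dv.2).get? "x_axis").getD ""))
            then PySem.Set.add cov k else cov) cov) PySem.Set.empty) k) =
        ((dashboards.map (fun dv =>
            (pvNorm (((PySem.Dict.mk dv.2).get? "y_axis").getD ""),
             pvNorm (((PySem.Dict.mk dv.2).get? "x_axis").getD "")))).any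
          (fun yx => PySem.Str.isIn (pvNorm k) yx.1 || PySem.Str.isIn (pvNorm k) yx.2)) := by
      intro k hk
      rw [Bool.eq_iff_iff, PySem.Set.contains_iff,
        pv_mem_outer dashboards kpis
          (fun d k => PySem.Str.isIn (pvNorm k) (pvNorm (((PySem.Dict.mk d).get? "y_axis").getD "")) ||
                      PySem.Str.isIn (pvNorm k) (pvNorm (((PySem.Dict.mk d).get? "x_axis").getD "")))
          PySem.Set.empty k]
      simp only [PySem.Set.empty, List.not_mem_nil, false_or, List.any_eq_true, List.mem_map]
      constructor
      · rintro ⟨_, d, hd, hq⟩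
        exact ⟨_, ⟨d, hd, rfl⟩, hq⟩
      · rintro ⟨_, ⟨d, hd, rfl⟩, hq⟩
        exact ⟨hk, d, hd, hq⟩
    have hcov' : ∀ k ∈ kpis,
        (!(PySem.Set.contains (dashboards.foldl (fun cov dv =>
          kpis.foldl (fun cov k =>
            if PySem.Str.isIn (pvNorm k) (pvNorm (((PySem.Dict.mk dv.2).get? "y_axis").getD "")) ||
               PySem.Str.isIn (pvNorm k) (pvNorm (((PySem.Dict.mk dv.2).get? "x_axis").getD ""))
            then PySem.Set.add cov k else cov) cov) PySem.Set.empty) k)) =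
        (!((dashboards.map (fun dv =>
            (pvNorm (((PySem.Dict.mk dv.2).get? "y_axis").getD ""),
             pvNorm (((PySem.Dict.mk dv.2).get? "x_axis").getD "")))).any
          (fun yx => PySem.Str.isIn (pvNorm k) yx.1 || PySem.Str.isIn (pvNorm k) yx.2))) := by
      intro k hk
      rw [hcov k hk]
    rw [pv_pair_fold kpis
        (fun k => (dashboards.map (fun dv =>
            (pvNorm (((PySem.Dict.mk dv.2).get? "y_axis").getD ""),
             pvNorm (((PySem.Dict.mk dv.2).get? "x_axis").getD "")))).any
          (fun yx => PySem.Str.isIn (pvNorm k) yx.1 || PySem.Str.isIn (pvNorm k) yx.2)) ([], []),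
      List.filter_congr hcov, List.filter_congr hcov']
    simp only [List.nil_append]
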